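-- pv_equiv track=rewrite | github.com/vlntnwbr/HanserPyLibrary | hanser_py_library/main.py | authors_to_string
-- ===== SOURCE A (Python) =====
-- from typing import List, Tuple
--
-- def authors_to_string(authors: List[str]) -> str:
--     """Return joined string of author names."""
--
--     string = ""
--     for i in range(len(authors)):
--         names = authors[i].split(",")
--
--         if i == 0:
--             sep = ""
--         elif i == len(authors) - 1 and i != 0:
--             sep = " and "
--         else:
--             sep = ", "
--
--         string += sep + names[1].strip() + " " + names[0].strip()
--
--     return string
-- ===== SOURCE B (Python) =====
-- def authors_to_string(authors):
--     """Return joined string of author names."""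
--     names = []
--     for author in authors:
--         parts = author.split(",")
--         names.append(parts[1].strip() + " " + parts[0].strip())
--     if not names:
--         return ""
--     if len(names) == 1:
--         return names[0]
--     return ", ".join(names[:-1]) + " and " + names[-1]
-- ===== Notes on version B (the rewrite author's own statement) =====
-- stated objective: simpler
-- what changed: Builds the list of formatted 'First Last' names once and handles the separators structurally (empty list, single name, or join all-but-last with ', ' and append ' and ' + last) instead of per-index i==0 / i==len-1 branching with a running string accumulator.
import Mathlib
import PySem

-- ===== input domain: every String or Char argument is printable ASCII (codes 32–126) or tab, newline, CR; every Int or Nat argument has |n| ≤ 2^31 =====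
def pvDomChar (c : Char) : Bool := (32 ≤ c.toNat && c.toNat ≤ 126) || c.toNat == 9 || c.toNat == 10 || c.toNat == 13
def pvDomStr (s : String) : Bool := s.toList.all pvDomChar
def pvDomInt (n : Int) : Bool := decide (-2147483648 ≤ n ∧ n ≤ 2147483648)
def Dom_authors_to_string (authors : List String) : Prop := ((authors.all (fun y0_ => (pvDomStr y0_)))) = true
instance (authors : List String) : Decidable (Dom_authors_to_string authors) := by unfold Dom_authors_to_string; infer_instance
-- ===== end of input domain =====

-- B replaces A's per-index separator branching + running accumulator by a list of formatted
-- names handled structurally (empty / singleton / join-all-but-last + " and " + last): simpler.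

-- ===== PORT A =====
def authors_to_string (authors : List String) : String :=
  (PySem.List.pyRange 0 (authors.length : Int) 1).foldl
    (fun string i =>
      let names := (PySem.Str.split? (PySem.List.pyGetD authors i "") ",").getD []
      let sep : String :=
        if i = 0 then ""
        else if i = (authors.length : Int) - 1 ∧ i ≠ 0 then " and "
        else ", "
      string ++ (sep ++ PySem.Str.strip (PySem.List.pyGetD names 1 "") ++ " " ++
        PySem.Str.strip (PySem.List.pyGetD names 0 "")))
    ""

-- ===== PORT B =====
def fmtAuthor (author : String) : String :=
  let parts := (PySem.Str.split? author ",").getD []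
  PySem.Str.strip (PySem.List.pyGetD parts 1 "") ++ " " ++ PySem.Str.strip (PySem.List.pyGetD parts 0 "")

def authors_to_string_alt (authors : List String) : String :=
  let names := authors.map fmtAuthor
  match names with
  | [] => ""
  | [n] => n
  | _ => PySem.Str.join ", " (PySem.List.slice names none (some (-1))) ++ " and " ++
         PySem.List.pyGetD names (-1) ""

-- ===== PRECONDITION & SPEC =====
-- Pre_ excludes exactly the inputs where some author has no comma: there Python A (and B) raise IndexError.
def Pre_authors_to_string (authors : List String) : Prop :=
  ∀ a ∈ authors, PySem.Str.isIn "," a = true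
instance (authors : List String) : Decidable (Pre_authors_to_string authors) := by
  unfold Pre_authors_to_string; infer_instance
def pvWitness_authors_to_string : List String := ["Doe, John", "Smith, Jane"]
def Spec_authors_to_string (authors : List String) (out : String) : Prop := out = authors_to_string_alt authors
instance (authors : List String) (out : String) : Decidable (Spec_authors_to_string authors out) := by unfold Spec_authors_to_string; infer_instance

-- ===== CLAIM (what is proved, stated in full; the proofs are below) =====
def Claim_equal_authors_to_string : Prop := ∀ (authors : List String), Dom_authors_to_string authors → Pre_authors_to_string authors → Spec_authors_to_string authors (authors_to_string authors)

-- ===== LEMMAS AND PROOFS =====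

-- canonical form of the tail of the joined string (proof-side only)
def tailJoin : List String → String
  | [] => ""
  | [y] => " and " ++ y
  | y :: z :: ys => ", " ++ y ++ tailJoin (z :: ys)

lemma strJoin_singleton (sep a : String) : PySem.Str.join sep [a] = a := by
  apply String.toList_inj.mp
  simp [PySem.Str.toList_join, PySem.Chars.join, List.intercalate]

lemma strJoin_cons_cons (sep a b : String) (rest : List String) :
    PySem.Str.join sep (a :: b :: rest) = a ++ sep ++ PySem.Str.join sep (b :: rest) := by
  apply String.toList_inj.mp
  simp [PySem.Str.toList_join, PySem.Chars.join_cons_cons]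

-- A's fold over the enumerated tail (indices ≥ 1) equals tailJoin of the formatted names.
lemma enumFold (xs : List String) (s n : Int) (acc : String)
    (h1 : 1 ≤ s) (h2 : s + xs.length = n) :
    (PySem.List.enumerate xs s).foldl
      (fun string p =>
        string ++ ((if p.1 = 0 then ""
          else if p.1 = n - 1 ∧ p.1 ≠ 0 then " and " else ", ") ++
          PySem.Str.strip (PySem.List.pyGetD ((PySem.Str.split? p.2 ",").getD []) 1 "") ++ " " ++
          PySem.Str.strip (PySem.List.pyGetD ((PySem.Str.split? p.2 ",").getD []) 0 ""))) acc
      = acc ++ tailJoin (xs.map fmtAuthor) := by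
  induction xs generalizing s acc with
  | nil => simp [PySem.List.enumerate, tailJoin]
  | cons x xs ih =>
    rw [PySem.List.enumerate_cons, List.foldl_cons]
    have hs0 : ¬ (s = 0) := by omega
    cases xs with
    | nil =>
      have hlast : s = n - 1 := by simp at h2; omega
      have hz : ¬ (n - 1 = 0) := by omega
      simp [PySem.List.enumerate, tailJoin, fmtAuthor, hz, hlast, String.append_assoc]
    | cons y ys =>
      have hne : ¬ (s = n - 1) := by
        simp only [List.length_cons] at h2; push_cast at h2; omega
      rw [ih (s + 1) _ (by omega)
        (by simp only [List.length_cons] at h2 ⊢; push_cast at h2 ⊢; omega)]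
      simp [tailJoin, fmtAuthor, hs0, hne, String.append_assoc]

-- B's join-all-but-last + " and " + last equals the same canonical form.
lemma altTail (x y : String) (ys : List String) :
    PySem.Str.join ", " (PySem.List.slice (x :: y :: ys) none (some (-1))) ++ " and " ++
      PySem.List.pyGetD (x :: y :: ys) (-1) "" = x ++ tailJoin (y :: ys) := by
  induction ys generalizing x y with
  | nil =>
    simp [PySem.List.slice_to_neg_one, PySem.List.pyGetD, PySem.List.pyGet?_neg_one,
      strJoin_singleton, tailJoin, String.append_assoc]
  | cons z zs ih =>
    have h := ih y z
    rw [PySem.List.slice_to_neg_one] at h ⊢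
    have hdrop : (x :: y :: z :: zs).dropLast = x :: (y :: z :: zs).dropLast := by
      simp [List.dropLast]
    rw [hdrop, show (y :: z :: zs).dropLast = y :: (z :: zs).dropLast from by simp [List.dropLast]]
    rw [strJoin_cons_cons]
    rw [show (y :: (z :: zs).dropLast) = (y :: z :: zs).dropLast from by simp [List.dropLast]]
    have hlast : PySem.List.pyGetD (x :: y :: z :: zs) (-1) "" = PySem.List.pyGetD (y :: z :: zs) (-1) "" := by
      simp [PySem.List.pyGetD, PySem.List.pyGet?_neg_one, List.getLast?]
    rw [hlast]
    calc x ++ ", " ++ PySem.Str.join ", " ((y :: z :: zs).dropLast) ++ " and " ++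
          PySem.List.pyGetD (y :: z :: zs) (-1) ""
        = x ++ ", " ++ (PySem.Str.join ", " ((y :: z :: zs).dropLast) ++ " and " ++
          PySem.List.pyGetD (y :: z :: zs) (-1) "") := by simp [String.append_assoc]
      _ = x ++ ", " ++ (y ++ tailJoin (z :: zs)) := by rw [h]
      _ = x ++ tailJoin (y :: z :: zs) := by simp [tailJoin, String.append_assoc]

-- A as a fold over the enumerated list.
lemma a_eq_enum (authors : List String) :
    authors_to_string authors =
    (PySem.List.enumerate authors 0).foldl
      (fun string p =>
        string ++ ((if p.1 = 0 then ""
          else if p.1 = (authors.length : Int) - 1 ∧ p.1 ≠ 0 then " and " else ", ") ++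
          PySem.Str.strip (PySem.List.pyGetD ((PySem.Str.split? p.2 ",").getD []) 1 "") ++ " " ++
          PySem.Str.strip (PySem.List.pyGetD ((PySem.Str.split? p.2 ",").getD []) 0 ""))) "" := by
  rw [PySem.List.enumerate_eq_map_pyRange authors "", List.foldl_map]
  rfl

-- ===== VERDICT (by name: the statement is the Claim_ definition above) =====
theorem authors_to_string_spec : Claim_equal_authors_to_string := by
  intro authors _ _
  unfold Spec_authors_to_string
  cases authors with
  | nil => rfl
  | cons a rest =>
    rw [a_eq_enum, PySem.List.enumerate_cons, List.foldl_cons]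
    cases rest with
    | nil =>
      simp [PySem.List.enumerate, authors_to_string_alt, fmtAuthor]
    | cons b rs =>
      rw [show ((0:Int) + 1) = 1 by norm_num]
      rw [enumFold (b :: rs) 1 ((a :: b :: rs).length : Int) _ (by omega) (by simp; omega)]
      simp only [authors_to_string_alt, List.map]
      rw [altTail (fmtAuthor a) (fmtAuthor b) (rs.map fmtAuthor)]
      simp [fmtAuthor, String.append_assoc]
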